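-- pv_equiv track=rewrite | github.com/vivekgautham/codingchallenges | challenges/src/algos/strings.py | reverseWordsBetweenDelimiters
-- ===== SOURCE A (Python) =====
-- def reverseWordsBetweenDelimiters(string, delimiters):
--     stringStack = []
--     delimiterStack = []
--     startsWithDelimiters = string[0] in delimiters if string else False
--     i = 0
--     delimList = []
--     curSt = ''
--
--     while i < len(string):
--         if string[i] in delimiters:
--             if curSt:
--                 stringStack.append(curSt)
--                 curSt = ''
--             delimList.append(string[i])
--         else:
--             if delimList:
--                 delimiterStack.append(delimList)
--                 delimList = []
--             curSt += string[i]
--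
--         i += 1
--     if curSt:
--         stringStack.append(curSt)
--     if delimList:
--         delimiterStack.append(delimList)
--
--     resStr = ''
--     i = 0
--     if startsWithDelimiters:
--         resStr += ''.join(delimiterStack[i])
--         i += 1
--     while stringStack and i < len(delimiterStack):
--         resStr += stringStack.pop()
--         resStr += ''.join(delimiterStack[i])
--         i += 1
--     if i < len(delimiterStack):
--         resStr += ''.join(delimiterStack[i])
--         i += 1
--     if stringStack:
--         resStr += stringStack.pop()
--     return resStr
-- ===== SOURCE B (Python) =====
-- def reverseWordsBetweenDelimiters(string, delimiters):
--     # Tokenize into maximal runs of (is_delimiter, text), then emit delimiter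
--     # runs verbatim and fill word slots with words popped from the end.
--     runs = []
--     for c in string:
--         is_d = c in delimiters
--         if runs and runs[-1][0] == is_d:
--             runs[-1][1] += c
--         else:
--             runs.append([is_d, c])
--     words = [t for d, t in runs if not d]
--     out = []
--     for d, t in runs:
--         out.append(t if d else words.pop())
--     return ''.join(out)
-- ===== Notes on version B (the rewrite author's own statement) =====
-- stated objective: alternative
-- what changed: Replaced A's two-stack scan (separate word stack and delimiter-run stack re-interleaved by an index/pop loop with three post-loop fixups) by a single groupby-style tokenization into maximal (is_delim, text) runs, emitting delimiter runs in place and popping words from the end of the word list.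
import Mathlib
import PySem

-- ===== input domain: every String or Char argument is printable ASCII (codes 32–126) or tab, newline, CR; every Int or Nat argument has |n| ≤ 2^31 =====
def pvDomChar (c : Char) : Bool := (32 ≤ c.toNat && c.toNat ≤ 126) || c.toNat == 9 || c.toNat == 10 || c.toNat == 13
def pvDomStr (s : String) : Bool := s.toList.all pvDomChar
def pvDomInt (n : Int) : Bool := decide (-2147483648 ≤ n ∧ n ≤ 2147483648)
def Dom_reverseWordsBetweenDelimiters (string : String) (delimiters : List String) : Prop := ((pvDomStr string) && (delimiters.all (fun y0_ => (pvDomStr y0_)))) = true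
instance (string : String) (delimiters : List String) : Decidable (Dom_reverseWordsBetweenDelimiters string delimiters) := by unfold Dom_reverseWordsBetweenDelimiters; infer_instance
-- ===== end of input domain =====

-- B tokenizes the input into maximal (is_delim, text) runs in one pass and refills the
-- word slots from the end of the word list, instead of A's two separate stacks re-interleaved
-- by an index/pop while-loop with post-loop fixups. Alternative decomposition, same cost.

-- ===== PORT A =====
-- `string[i] in delimiters` : a one-character string tested against the list
def pvIsDelimA (c : Char) (delimiters : List String) : Bool :=
  delimiters.contains (String.ofList [c])

-- first while-loop of A: builds stringStack (word runs) and delimiterStack (delimiter runs)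
def pvScanA (delimiters : List String) :
    List Char → List (List Char) → List (List Char) → List Char → List Char →
    List (List Char) × List (List Char)
  | [], ss, ds, dl, cur =>
      ((if cur ≠ [] then ss ++ [cur] else ss), (if dl ≠ [] then ds ++ [dl] else ds))
  | c :: rest, ss, ds, dl, cur =>
      if pvIsDelimA c delimiters then
        pvScanA delimiters rest (if cur ≠ [] then ss ++ [cur] else ss) ds (dl ++ [c]) []
      else
        pvScanA delimiters rest ss (if dl ≠ [] then ds ++ [dl] else ds) [] (cur ++ [c])

-- second while-loop of A plus its two trailing `if`s (resStr accumulation)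
def pvWhileA (ss : List (List Char)) (ds : List (List Char)) : List Char :=
  if ss ≠ [] ∧ ds ≠ [] then
    ss.getLast! ++ ds.head! ++ pvWhileA ss.dropLast ds.tail
  else
    (if ds ≠ [] then ds.head! else []) ++ (if ss ≠ [] then ss.getLast! else [])
termination_by ss.length
decreasing_by
  have h : ss ≠ [] := by tauto
  simpa [List.length_dropLast] using Nat.sub_lt (List.length_pos_iff.mpr h) one_pos

def reverseWordsBetweenDelimiters (string : String) (delimiters : List String) : String :=
  let cs := string.toList
  let startsWithDelimiters := match cs with
    | [] => false
    | c :: _ => pvIsDelimA c delimiters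
  let p := pvScanA delimiters cs [] [] [] []
  if startsWithDelimiters then
    String.ofList (p.2.head! ++ pvWhileA p.1 p.2.tail)
  else
    String.ofList (pvWhileA p.1 p.2)

-- ===== PORT B =====
-- the run-building loop of B (groupby-style maximal runs)
def pvStepB (delimiters : List String) (runs : List (Bool × List Char)) (c : Char) :
    List (Bool × List Char) :=
  let d := delimiters.contains (String.ofList [c])
  match runs.getLast? with
  | some (d', t) =>
      if d' == d then runs.dropLast ++ [(d, t ++ [c])] else runs ++ [(d, [c])]
  | none => [(d, [c])]

def pvRunsB (delimiters : List String) (cs : List Char) : List (Bool × List Char) :=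
  cs.foldl (pvStepB delimiters) []

def pvWordsB (runs : List (Bool × List Char)) : List (List Char) :=
  runs.filterMap (fun p => if p.1 then none else some p.2)

-- the emit loop of B: delimiter runs verbatim, word runs take words.pop()
def pvEmitB : List (Bool × List Char) → List (List Char) → List Char
  | [], _ => []
  | (true, t) :: rest, ws => t ++ pvEmitB rest ws
  | (false, _) :: rest, ws => ws.getLast! ++ pvEmitB rest ws.dropLast

def reverseWordsBetweenDelimiters_alt (string : String) (delimiters : List String) : String :=
  let runs := pvRunsB delimiters string.toList
  String.ofList (pvEmitB runs (pvWordsB runs))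

-- ===== PRECONDITION & SPEC =====
def Spec_reverseWordsBetweenDelimiters (string : String) (delimiters : List String) (out : String) : Prop := out = reverseWordsBetweenDelimiters_alt string delimiters
instance (string : String) (delimiters : List String) (out : String) : Decidable (Spec_reverseWordsBetweenDelimiters string delimiters out) := by unfold Spec_reverseWordsBetweenDelimiters; infer_instance

-- ===== CLAIM (what is proved, stated in full; the proofs are below) =====
def Claim_equal_reverseWordsBetweenDelimiters : Prop := ∀ (string : String) (delimiters : List String), Dom_reverseWordsBetweenDelimiters string delimiters → Spec_reverseWordsBetweenDelimiters string delimiters (reverseWordsBetweenDelimiters string delimiters)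

-- ===== LEMMAS AND PROOFS =====

-- delimiter-run texts of a run list (mirror of pvWordsB)
def pvDelims (runs : List (Bool × List Char)) : List (List Char) :=
  runs.filterMap (fun p => if p.1 then some p.2 else none)

@[simp] lemma pvWordsB_nil : pvWordsB [] = [] := rfl
@[simp] lemma pvDelims_nil : pvDelims [] = [] := rfl
@[simp] lemma pvWordsB_append (a b : List (Bool × List Char)) :
    pvWordsB (a ++ b) = pvWordsB a ++ pvWordsB b := by simp [pvWordsB]
@[simp] lemma pvDelims_append (a b : List (Bool × List Char)) :
    pvDelims (a ++ b) = pvDelims a ++ pvDelims b := by simp [pvDelims]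
@[simp] lemma pvWordsB_cons (p : Bool × List Char) (rs : List (Bool × List Char)) :
    pvWordsB (p :: rs) = (if p.1 then [] else [p.2]) ++ pvWordsB rs := by
  cases p with | mk f t => cases f <;> simp [pvWordsB]
@[simp] lemma pvDelims_cons (p : Bool × List Char) (rs : List (Bool × List Char)) :
    pvDelims (p :: rs) = (if p.1 then [p.2] else []) ++ pvDelims rs := by
  cases p with | mk f t => cases f <;> simp [pvDelims]

lemma pvStepB_nil (delimiters : List String) (c : Char) :
    pvStepB delimiters [] c = [(pvIsDelimA c delimiters, [c])] := by
  simp [pvStepB, pvIsDelimA]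

lemma pvStepB_concat (delimiters : List String) (rs₀ : List (Bool × List Char))
    (f : Bool) (t : List Char) (c : Char) :
    pvStepB delimiters (rs₀ ++ [(f, t)]) c =
      if f == pvIsDelimA c delimiters then rs₀ ++ [(pvIsDelimA c delimiters, t ++ [c])]
      else rs₀ ++ [(f, t), (pvIsDelimA c delimiters, [c])] := by
  simp only [pvStepB, pvIsDelimA, List.getLast?_concat, List.dropLast_concat]
  split <;> simp

-- coupling invariant between A's scan state and B's accumulated run list
def pvInv (rs : List (Bool × List Char)) (ss ds : List (List Char)) (dl cur : List Char) : Prop :=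
  (rs = [] ∧ ss = [] ∧ ds = [] ∧ dl = [] ∧ cur = []) ∨
  (∃ rs₀ t, t ≠ [] ∧ rs = rs₀ ++ [(false, t)] ∧ cur = t ∧ dl = [] ∧
      ss = pvWordsB rs₀ ∧ ds = pvDelims rs₀) ∨
  (∃ rs₀ t, t ≠ [] ∧ rs = rs₀ ++ [(true, t)] ∧ dl = t ∧ cur = [] ∧
      ss = pvWordsB rs ∧ ds = pvDelims rs₀)

lemma pvScan_runs (delimiters : List String) :
    ∀ (cs : List Char) (rs : List (Bool × List Char)) (ss ds : List (List Char))
      (dl cur : List Char), pvInv rs ss ds dl cur →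
      pvScanA delimiters cs ss ds dl cur =
        (pvWordsB (cs.foldl (pvStepB delimiters) rs),
         pvDelims (cs.foldl (pvStepB delimiters) rs)) := by
  intro cs
  induction cs with
  | nil =>
    intro rs ss ds dl cur hinv
    rcases hinv with ⟨h1,h2,h3,h4,h5⟩ | ⟨rs₀,t,ht,hrs,hc,hd,hss,hds⟩ | ⟨rs₀,t,ht,hrs,hd,hc,hss,hds⟩
    · subst_vars; simp [pvScanA]
    · subst_vars; simp [pvScanA, ht]
    · subst_vars; simp [pvScanA, ht]
  | cons c rest ih =>
    intro rs ss ds dl cur hinv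
    rw [List.foldl_cons]
    cases hd : pvIsDelimA c delimiters
    all_goals rcases hinv with ⟨h1, h2, h3, h4, h5⟩ |
      ⟨rs₀, t, ht, hrs, hc, hdl, hss, hds⟩ | ⟨rs₀, t, ht, hrs, hdl, hc, hss, hds⟩
    all_goals subst_vars
    · -- c is a word character, state empty
      rw [show pvScanA delimiters (c :: rest) [] [] [] [] =
        pvScanA delimiters rest [] [] [] [c] from by simp [pvScanA, hd]]
      rw [pvStepB_nil, hd]
      apply ih
      right; left
      exact ⟨[], [c], by simp, by simp, rfl, rfl, rfl, rfl⟩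
    · -- c is a word character, last run is a word run
      rw [show pvScanA delimiters (c :: rest) (pvWordsB rs₀) (pvDelims rs₀) [] t =
        pvScanA delimiters rest (pvWordsB rs₀) (pvDelims rs₀) [] (t ++ [c]) from by
          simp [pvScanA, hd]]
      rw [pvStepB_concat, hd]
      simp only [BEq.rfl, if_true]
      apply ih
      right; left
      exact ⟨rs₀, t ++ [c], by simp, rfl, rfl, rfl, rfl, rfl⟩
    · -- c is a word character, last run is a delimiter run
      rw [show pvScanA delimiters (c :: rest) (pvWordsB (rs₀ ++ [(true, t)])) (pvDelims rs₀) t [] =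
        pvScanA delimiters rest (pvWordsB (rs₀ ++ [(true, t)])) (pvDelims rs₀ ++ [t]) [] [c] from by
          simp [pvScanA, hd, ht]]
      rw [pvStepB_concat, hd]
      rw [if_neg (by simp)]
      apply ih
      right; left
      refine ⟨rs₀ ++ [(true, t)], [c], by simp, by simp, rfl, rfl, rfl, ?_⟩
      simp
    · -- c is a delimiter, state empty
      rw [show pvScanA delimiters (c :: rest) [] [] [] [] =
        pvScanA delimiters rest [] [] [c] [] from by simp [pvScanA, hd]]
      rw [pvStepB_nil, hd]
      apply ih
      right; right
      exact ⟨[], [c], by simp, by simp, rfl, rfl, by simp, rfl⟩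
    · -- c is a delimiter, last run is a word run
      rw [show pvScanA delimiters (c :: rest) (pvWordsB rs₀) (pvDelims rs₀) [] t =
        pvScanA delimiters rest (pvWordsB rs₀ ++ [t]) (pvDelims rs₀) [c] [] from by
          simp [pvScanA, hd, ht]]
      rw [pvStepB_concat, hd]
      rw [if_neg (by simp)]
      apply ih
      right; right
      refine ⟨rs₀ ++ [(false, t)], [c], by simp, by simp, rfl, rfl, ?_, ?_⟩ <;> simp
    · -- c is a delimiter, last run is a delimiter run
      rw [show pvScanA delimiters (c :: rest) (pvWordsB (rs₀ ++ [(true, t)])) (pvDelims rs₀) t [] =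
        pvScanA delimiters rest (pvWordsB (rs₀ ++ [(true, t)])) (pvDelims rs₀) (t ++ [c]) [] from by
          simp [pvScanA, hd]]
      rw [pvStepB_concat, hd]
      simp only [BEq.rfl, if_true]
      apply ih
      right; right
      refine ⟨rs₀, t ++ [c], by simp, rfl, rfl, rfl, ?_, rfl⟩
      simp

-- alternation of the run flags, as a front-to-back predicate on the flag list
def pvAltF : List Bool → Prop
  | [] => True
  | [_] => True
  | a :: b :: l => a ≠ b ∧ pvAltF (b :: l)

def pvAlt (rs : List (Bool × List Char)) : Prop := pvAltF (rs.map Prod.fst)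

lemma pvAltF_tail (a : Bool) (l : List Bool) (h : pvAltF (a :: l)) : pvAltF l := by
  cases l with
  | nil => trivial
  | cons b l => exact h.2

lemma pvAltF_snoc : ∀ (l : List Bool) (a b : Bool), pvAltF (l ++ [a]) → a ≠ b →
    pvAltF (l ++ [a, b]) := by
  intro l
  induction l with
  | nil => intro a b _ hab; exact ⟨hab, trivial⟩
  | cons x l ih =>
    intro a b h hab
    cases l with
    | nil => exact ⟨h.1, ih a b h.2 hab⟩
    | cons y l => exact ⟨h.1, ih a b h.2 hab⟩


lemma pvAlt_step (delimiters : List String) (rs : List (Bool × List Char)) (c : Char)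
    (h : pvAlt rs) : pvAlt (pvStepB delimiters rs c) := by
  rcases List.eq_nil_or_concat rs with rfl | ⟨rs₀, ⟨f, t⟩, rfl⟩
  · rw [pvStepB_nil]; trivial
  · simp only [List.concat_eq_append] at h ⊢
    rw [pvStepB_concat]
    unfold pvAlt at h ⊢
    by_cases hf : f = pvIsDelimA c delimiters
    · subst hf; simp only [BEq.rfl, if_true]; simpa using h
    · have : (f == pvIsDelimA c delimiters) = false := by simp [hf]
      rw [this]; simp only [Bool.false_eq_true, if_false]
      have h' : pvAltF (rs₀.map Prod.fst ++ [f]) := by simpa using h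
      have := pvAltF_snoc (rs₀.map Prod.fst) f (pvIsDelimA c delimiters) h' hf
      simpa using this

lemma pvAlt_runs (delimiters : List String) (cs : List Char) :
    ∀ rs, pvAlt rs → pvAlt (cs.foldl (pvStepB delimiters) rs) := by
  induction cs with
  | nil => intro rs h; exact h
  | cons c rest ih => intro rs h; exact ih _ (pvAlt_step delimiters rs c h)

-- head flag of the run list is preserved by every step on a nonempty list
lemma pvStepB_head (delimiters : List String) (rs : List (Bool × List Char)) (c : Char)
    (h : rs ≠ []) :
    (pvStepB delimiters rs c).head?.map Prod.fst = rs.head?.map Prod.fst ∧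
      pvStepB delimiters rs c ≠ [] := by
  rcases rs with _ | ⟨p, rs'⟩
  · exact absurd rfl h
  rcases List.eq_nil_or_concat rs' with rfl | ⟨rs₀, ⟨f, t⟩, rfl⟩
  · have : p :: ([] : List (Bool × List Char)) = [] ++ [p] := rfl
    rw [this, pvStepB_concat]
    split
    · next hb =>
      have hp1 : p.1 = pvIsDelimA c delimiters := by simpa using hb
      refine ⟨?_, by simp⟩
      simp [hp1]
    · simp
  · simp only [List.concat_eq_append]
    have : p :: (rs₀ ++ [(f, t)]) = (p :: rs₀) ++ [(f, t)] := by simp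
    rw [this, pvStepB_concat]
    split <;> simp

lemma pvHead_flag (delimiters : List String) (cs : List Char) :
    ∀ rs, rs ≠ [] →
    (cs.foldl (pvStepB delimiters) rs).head?.map Prod.fst = rs.head?.map Prod.fst ∧
      cs.foldl (pvStepB delimiters) rs ≠ [] := by
  induction cs with
  | nil => intro rs h; exact ⟨rfl, h⟩
  | cons c rest ih =>
    intro rs h
    have hs := pvStepB_head delimiters rs c h
    have := ih (pvStepB delimiters rs c) hs.2
    exact ⟨by rw [List.foldl_cons, this.1, hs.1], by rw [List.foldl_cons]; exact this.2⟩

lemma pvWhileA_nil_nil : pvWhileA [] [] = [] := by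
  rw [pvWhileA]; simp

lemma pvHead_false_of_alt (rs : List (Bool × List Char))
    (h : pvAltF (true :: rs.map Prod.fst)) : ∀ p ∈ rs.head?, p.1 = false := by
  intro p hp
  cases rs with
  | nil => simp at hp
  | cons q rest =>
    have hpq : q = p := by simpa using hp
    subst hpq
    have hne : true ≠ q.1 := h.1
    cases hb : q.1
    · rfl
    · exact absurd hb.symm hne

-- A's emit loop equals B's emit over an alternating run list starting with a word run
lemma pvEmit_eq : ∀ (n : ℕ) (rs : List (Bool × List Char)) (ws : List (List Char)),
    rs.length ≤ n → pvAlt rs → (∀ p ∈ rs.head?, p.1 = false) →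
    ws.length = (pvWordsB rs).length →
    pvWhileA ws (pvDelims rs) = pvEmitB rs ws := by
  intro n
  induction n with
  | zero =>
    intro rs ws hlen _ _ hw
    have : rs = [] := List.length_eq_zero_iff.mp (Nat.le_zero.mp hlen)
    subst this
    have : ws = [] := List.length_eq_zero_iff.mp (by simpa using hw)
    subst this
    rw [pvWhileA]; simp [pvEmitB]
  | succ n ih =>
    intro rs ws hlen halt hhead hw
    match rs with
    | [] =>
      have : ws = [] := List.length_eq_zero_iff.mp (by simpa using hw)
      subst this
      rw [pvWhileA]; simp [pvEmitB]
    | (true, t) :: rest =>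
      have := hhead (true, t) (by simp)
      simp at this
    | [(false, w)] =>
      obtain ⟨x, rfl⟩ := List.length_eq_one_iff.mp (by simpa using hw)
      rw [pvWhileA]
      rw [if_neg (by simp)]
      simp [pvEmitB]
    | (false, w) :: (f, d) :: rest2 =>
      have hfd : false ≠ f ∧ pvAltF (f :: rest2.map Prod.fst) := halt
      have hf : f = true := by
        cases f
        · exact absurd rfl hfd.1
        · rfl
      subst hf
      have hwlen : ws.length = (pvWordsB rest2).length + 1 := by
        simpa [Nat.add_comm] using hw
      have hne : ws ≠ [] := by
        intro h; rw [h] at hwlen; simp at hwlen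
      obtain ⟨ws₀, x, rfl⟩ := (List.eq_nil_or_concat ws).resolve_left hne
      simp only [List.concat_eq_append] at hwlen hw ⊢
      have hih : pvWhileA ws₀ (pvDelims rest2) = pvEmitB rest2 ws₀ := by
        apply ih rest2 ws₀
        · have : rest2.length + 2 ≤ n + 1 := by simpa using hlen
          omega
        · exact pvAltF_tail true (List.map Prod.fst rest2) hfd.2
        · exact pvHead_false_of_alt rest2 hfd.2
        · have := hwlen; simp at this ⊢; omega
      rw [pvWhileA]
      have hcond : (ws₀ ++ [x] ≠ [] ∧ pvDelims ((false, w) :: (true, d) :: rest2) ≠ []) := by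
        constructor <;> simp
      rw [if_pos hcond]
      simp only [pvEmitB, pvDelims_cons, if_true, Bool.false_eq_true, if_false,
        List.nil_append, List.dropLast_concat]
      simp [hih]

-- ===== VERDICT (by name: the statement is the Claim_ definition above) =====
theorem reverseWordsBetweenDelimiters_spec : Claim_equal_reverseWordsBetweenDelimiters := by
  intro s delimiters _
  unfold Spec_reverseWordsBetweenDelimiters
  cases hcs : s.toList with
  | nil =>
    simp only [reverseWordsBetweenDelimiters, reverseWordsBetweenDelimiters_alt, pvRunsB, hcs]
    rw [show pvScanA delimiters [] [] [] [] [] = ([], []) from by simp [pvScanA]]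
    rw [if_neg (by simp)]
    simp [pvWhileA_nil_nil, pvEmitB]
  | cons c rest =>
    simp only [reverseWordsBetweenDelimiters, reverseWordsBetweenDelimiters_alt, pvRunsB, hcs]
    have hscan := pvScan_runs delimiters (c :: rest) [] [] [] [] []
      (Or.inl ⟨rfl, rfl, rfl, rfl, rfl⟩)
    have halt : pvAlt ((c :: rest).foldl (pvStepB delimiters) []) := by
      apply pvAlt_runs; trivial
    have hfold : (c :: rest).foldl (pvStepB delimiters) [] =
        rest.foldl (pvStepB delimiters) [(pvIsDelimA c delimiters, [c])] := by
      rw [List.foldl_cons, pvStepB_nil]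
    have hhead := pvHead_flag delimiters rest [(pvIsDelimA c delimiters, [c])] (by simp)
    rw [hscan]
    cases hd : pvIsDelimA c delimiters
    · -- first character is not a delimiter: run list starts with a word run
      rw [if_neg (by simp)]
      rw [hd] at hfold hhead
      congr 1
      apply pvEmit_eq ((c :: rest).foldl (pvStepB delimiters) []).length _ _ le_rfl halt
      · intro p hp
        rw [hfold] at hp
        cases hrs2 : (rest.foldl (pvStepB delimiters) [(false, [c])]).head? with
        | none => rw [hrs2] at hp; simp at hp
        | some q =>
          rw [hrs2] at hp
          have h1 := hhead.1
          rw [hrs2] at h1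
          have hqp : q = p := by simpa using hp
          subst hqp
          simpa using h1
      · rfl
    · -- first character is a delimiter: run list starts with a delimiter run
      rw [if_pos rfl]
      rw [hd] at hfold hhead
      rw [hfold] at halt ⊢
      rcases hrs : rest.foldl (pvStepB delimiters) [(true, [c])] with _ | ⟨⟨f, t⟩, rs'⟩
      · exact absurd hrs hhead.2
      rw [hrs] at halt hhead
      have hft : f = true := by simpa using hhead.1
      subst hft
      simp only [pvDelims_cons, pvWordsB_cons, if_true, List.nil_append, pvEmitB,
        List.head!_cons, List.tail_cons, List.singleton_append]
      congr 1
      congr 1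
      apply pvEmit_eq rs'.length _ _ le_rfl (pvAltF_tail true (List.map Prod.fst rs') halt)
      · exact pvHead_false_of_alt rs' halt
      · rfl
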